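-- pv_equiv track=rewrite | github.com/open-cu/code-cheating | course/1/subject_python/M/40501-39199.py | find_strikes_lens
-- ===== SOURCE A (Python) =====
-- def find_strikes_lens(visits):
--     if len(visits) == 1:
--         return [1]
--
--     strikes_lens = []
--     strike_start = 0
--
--     for i in range(1, len(visits)):
--         if visits[i] <= visits[i - 1]:
--             strikes_lens.append(i - strike_start)
--             strike_start = i
--
--         if i == len(visits) - 1:
--             if visits[i] <= visits[i - 1]:
--                 strikes_lens.append(1)
--             else:
--                 strikes_lens.append(i + 1 - strike_start)
--
--     return strikes_lens
-- ===== SOURCE B (Python) =====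
-- def find_strikes_lens(visits):
--     if not visits:
--         return []
--     n = len(visits)
--     boundaries = [0]
--     for i in range(1, n):
--         if visits[i] <= visits[i - 1]:
--             boundaries.append(i)
--     boundaries.append(n)
--     return [boundaries[k + 1] - boundaries[k] for k in range(len(boundaries) - 1)]
-- ===== Notes on version B (the rewrite author's own statement) =====
-- stated objective: alternative
-- what changed: A detects runs in one interleaved pass carrying a run-start accumulator with a special end-of-list branch; B first collects the list of run-boundary indices and then returns the consecutive differences of that boundary list.
import Mathlib
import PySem

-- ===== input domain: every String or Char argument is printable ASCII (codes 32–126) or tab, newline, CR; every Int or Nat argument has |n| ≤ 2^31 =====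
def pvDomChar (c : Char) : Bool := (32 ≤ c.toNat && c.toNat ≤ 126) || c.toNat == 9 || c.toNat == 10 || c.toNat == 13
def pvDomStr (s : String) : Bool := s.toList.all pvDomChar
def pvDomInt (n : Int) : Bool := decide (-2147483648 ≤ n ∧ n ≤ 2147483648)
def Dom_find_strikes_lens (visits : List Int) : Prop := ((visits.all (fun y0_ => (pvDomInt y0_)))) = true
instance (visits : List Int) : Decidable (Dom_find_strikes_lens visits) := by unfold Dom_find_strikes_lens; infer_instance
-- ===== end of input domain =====

-- B replaces A's single interleaved pass (run accumulator with an end-of-list special case)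
-- by collecting run-boundary indices and returning their consecutive differences (objective: alternative).

-- ===== PORT A =====
-- literal port of A: one fold over range(1, n) carrying (strikes_lens, strike_start)
def find_strikes_lens (visits : List Int) : List Int :=
  if visits.length = 1 then [1]
  else
    ((PySem.List.pyRange 1 (visits.length : Int) 1).foldl
      (fun (s : List Int × Int) i =>
        -- first if: visits[i] <= visits[i-1] → append i - strike_start, strike_start = i
        let s1 : List Int × Int :=
          if PySem.List.pyGetD visits i 0 ≤ PySem.List.pyGetD visits (i - 1) 0
          then (s.1 ++ [i - s.2], i) else s
        -- second if: i == len(visits) - 1 → append the final run length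
        if i = (visits.length : Int) - 1 then
          if PySem.List.pyGetD visits i 0 ≤ PySem.List.pyGetD visits (i - 1) 0
          then (s1.1 ++ [1], s1.2)
          else (s1.1 ++ [i + 1 - s1.2], s1.2)
        else s1)
      ([], 0)).1

-- ===== PORT B =====
-- literal port of Source B: collect boundary indices, then map consecutive differences
def find_strikes_lens_alt (visits : List Int) : List Int :=
  if visits = [] then []
  else
    let boundaries : List Int :=
      ((PySem.List.pyRange 1 (visits.length : Int) 1).foldl
        (fun (bs : List Int) i =>
          if PySem.List.pyGetD visits i 0 ≤ PySem.List.pyGetD visits (i - 1) 0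
          then bs ++ [i] else bs)
        [0]) ++ [(visits.length : Int)]
    (PySem.List.pyRange 0 ((boundaries.length : Int) - 1) 1).map
      (fun k => PySem.List.pyGetD boundaries (k + 1) 0 - PySem.List.pyGetD boundaries k 0)

-- ===== PRECONDITION & SPEC =====
def Spec_find_strikes_lens (visits : List Int) (out : List Int) : Prop := out = find_strikes_lens_alt visits
instance (visits : List Int) (out : List Int) : Decidable (Spec_find_strikes_lens visits out) := by unfold Spec_find_strikes_lens; infer_instance

-- ===== CLAIM (what is proved, stated in full; the proofs are below) =====
def Claim_equal_find_strikes_lens : Prop := ∀ (visits : List Int), Dom_find_strikes_lens visits → Spec_find_strikes_lens visits (find_strikes_lens visits)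

-- ===== LEMMAS AND PROOFS =====

-- consecutive differences of a list (the value B's index comprehension computes)
def adjDiffs : List Int → List Int
  | [] => []
  | [_] => []
  | a :: b :: t => (b - a) :: adjDiffs (b :: t)

theorem adjDiffs_append (bs : List Int) (x : Int) (h : bs ≠ []) :
    adjDiffs (bs ++ [x]) = adjDiffs bs ++ [x - bs.getLastD 0] := by
  induction bs with
  | nil => exact absurd rfl h
  | cons a t ih =>
    cases t with
    | nil => simp [adjDiffs]
    | cons b u =>
      simp only [List.cons_append, adjDiffs] at ih ⊢
      rw [ih (by simp)]
      simp

-- B's index comprehension over a list computes its consecutive differences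
theorem range_diffs (bs : List Int) :
    (List.range (bs.length - 1)).map
      (fun k => bs.getD (k + 1) 0 - bs.getD k 0) = adjDiffs bs := by
  induction bs with
  | nil => simp [adjDiffs]
  | cons a t ih =>
    cases t with
    | nil => simp [adjDiffs]
    | cons b u =>
      have hlen : (a :: b :: u).length - 1 = ((b :: u).length - 1) + 1 := by simp
      rw [hlen, List.range_succ_eq_map]
      simp only [List.map_cons, List.map_map]
      show _ = (b - a) :: adjDiffs (b :: u)
      rw [← ih]
      refine congrArg₂ List.cons (by simp) ?_
      refine List.map_congr_left (fun k _ => ?_)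
      simp [Function.comp]

-- invariant of A's interior loop (the i ≠ n-1 iterations)
theorem fold_inv (c : Int → Bool) (l : List Int) (s : List Int) (t : Int) :
    l.foldl (fun (st : List Int × Int) i =>
        if c i then (st.1 ++ [i - st.2], i) else st) (s, t)
      = (s ++ adjDiffs (t :: l.filter c), (t :: l.filter c).getLastD 0) := by
  induction l generalizing s t with
  | nil => simp [adjDiffs]
  | cons a l ih =>
    by_cases h : c a
    · simp only [List.foldl_cons, h, if_pos, List.filter_cons_of_pos h]
      rw [ih]
      simp [adjDiffs]
    · simp only [List.foldl_cons]
      rw [if_neg (by simp [h]), ih]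
      simp [h]

-- B expressed through adjDiffs
theorem alt_eq_adjDiffs (visits : List Int) (h : visits ≠ []) :
    find_strikes_lens_alt visits
      = adjDiffs ((0 :: (PySem.List.pyRange 1 (visits.length : Int) 1).filter
            (fun i => decide (PySem.List.pyGetD visits i 0 ≤ PySem.List.pyGetD visits (i - 1) 0)))
          ++ [(visits.length : Int)]) := by
  unfold find_strikes_lens_alt
  rw [if_neg h]
  have hb : ((PySem.List.pyRange 1 (visits.length : Int) 1).foldl
      (fun (bs : List Int) i =>
        if PySem.List.pyGetD visits i 0 ≤ PySem.List.pyGetD visits (i - 1) 0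
        then bs ++ [i] else bs) [0])
      = [0] ++ List.map id ((PySem.List.pyRange 1 (visits.length : Int) 1).filter
          (fun i => decide (PySem.List.pyGetD visits i 0 ≤ PySem.List.pyGetD visits (i - 1) 0))) := by
    rw [← PySem.List.foldl_append_if
      (fun i => decide (PySem.List.pyGetD visits i 0 ≤ PySem.List.pyGetD visits (i - 1) 0)) id]
    simp
  simp only [hb, List.map_id]
  set bs : List Int := ([0] ++ (PySem.List.pyRange 1 (visits.length : Int) 1).filter
      (fun i => decide (PySem.List.pyGetD visits i 0 ≤ PySem.List.pyGetD visits (i - 1) 0)))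
      ++ [(visits.length : Int)] with hbs
  have hbsne : bs ≠ [] := by
    rw [hbs]; exact List.append_ne_nil_of_right_ne_nil _ (List.cons_ne_nil _ _)
  have hlen : ((bs.length : Int) - 1) = ((bs.length - 1 : Nat) : Int) := by
    have : 1 ≤ bs.length := List.length_pos_iff.mpr hbsne
    omega
  rw [hlen, PySem.List.pyRange_zero_natCast, List.map_map]
  have : ∀ k : Nat, (fun k : Nat =>
        PySem.List.pyGetD bs ((k : Int) + 1) 0 - PySem.List.pyGetD bs (k : Int) 0) k
      = (fun k : Nat => bs.getD (k + 1) 0 - bs.getD k 0) k := by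
    intro k
    have h1 : ((k : Int) + 1) = ((k + 1 : Nat) : Int) := by push_cast; ring
    simp only [h1, PySem.List.pyGetD_natCast]
  calc (List.range (bs.length - 1)).map (fun k : Nat =>
          PySem.List.pyGetD bs ((k : Int) + 1) 0 - PySem.List.pyGetD bs (k : Int) 0)
      = (List.range (bs.length - 1)).map (fun k : Nat => bs.getD (k + 1) 0 - bs.getD k 0) :=
        List.map_congr_left (fun k _ => this k)
    _ = adjDiffs bs := range_diffs bs
    _ = adjDiffs ((0 :: (PySem.List.pyRange 1 (visits.length : Int) 1).filter
            (fun i => decide (PySem.List.pyGetD visits i 0 ≤ PySem.List.pyGetD visits (i - 1) 0)))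
          ++ [(visits.length : Int)]) := by rw [hbs]; simp

-- main equivalence
theorem main_eq (visits : List Int) : find_strikes_lens visits = find_strikes_lens_alt visits := by
  match hv : visits with
  | [] => decide
  | [a] =>
    unfold find_strikes_lens find_strikes_lens_alt
    norm_num [PySem.List.pyRange]
    all_goals decide
  | a :: b :: rest =>
    set v := a :: b :: rest with hvdef
    have hne : v ≠ [] := by simp [hvdef]
    have hlen2 : 2 ≤ v.length := by simp [hvdef]
    rw [alt_eq_adjDiffs v hne]
    unfold find_strikes_lens
    rw [if_neg (by omega : ¬ v.length = 1)]
    set N : Int := (v.length : Int) with hN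
    have hN2 : 2 ≤ N := by rw [hN]; exact_mod_cast hlen2
    set c : Int → Bool :=
      fun i => decide (PySem.List.pyGetD v i 0 ≤ PySem.List.pyGetD v (i - 1) 0) with hc
    have hsplit : PySem.List.pyRange 1 N 1 = PySem.List.pyRange 1 (N - 1) 1 ++ [N - 1] := by
      have h := PySem.List.pyRange_one_succ_right (a := 1) (b := N - 1) (by omega)
      rw [show N - 1 + 1 = N by ring] at h
      exact h
    rw [hsplit, List.foldl_append, List.filter_append]
    -- interior iterations never hit i = N - 1
    have hcongr : (PySem.List.pyRange 1 (N - 1) 1).foldl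
        (fun (s : List Int × Int) i =>
          let s1 : List Int × Int :=
            if PySem.List.pyGetD v i 0 ≤ PySem.List.pyGetD v (i - 1) 0
            then (s.1 ++ [i - s.2], i) else s
          if i = N - 1 then
            if PySem.List.pyGetD v i 0 ≤ PySem.List.pyGetD v (i - 1) 0
            then (s1.1 ++ [1], s1.2)
            else (s1.1 ++ [i + 1 - s1.2], s1.2)
          else s1) ([], 0)
        = (PySem.List.pyRange 1 (N - 1) 1).foldl
          (fun (st : List Int × Int) i => if c i then (st.1 ++ [i - st.2], i) else st) ([], 0) := by
      apply PySem.List.foldl_congr_mem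
      intro acc x hx
      have hxlt : x < N - 1 := (PySem.List.mem_pyRange_one.mp hx).2
      simp only [hc, decide_eq_true_eq]
      rw [if_neg (by omega : ¬ x = N - 1)]
    rw [hcongr, fold_inv]
    set F : List Int := (PySem.List.pyRange 1 (N - 1) 1).filter c with hF
    have hne0F : (0 : Int) :: F ≠ [] := by simp
    simp only [List.foldl_cons, List.foldl_nil, List.nil_append]
    by_cases hcond : PySem.List.pyGetD v (N - 1) 0 ≤ PySem.List.pyGetD v (N - 1 - 1) 0
    · -- last element starts a new run: append (N-1 - start) then 1
      have hcN : c (N - 1) = true := by simp [hc, hcond]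
      simp only [if_pos hcond, List.filter_cons, List.filter_nil, hcN, if_true]
      have h1 : ((0 : Int) :: (F ++ [N - 1])) ++ [N] = ((0 :: F) ++ [N - 1]) ++ [N] := by simp
      rw [h1, adjDiffs_append ((0 :: F) ++ [N - 1]) N (by simp),
          adjDiffs_append (0 :: F) (N - 1) hne0F, List.getLastD_concat,
          show N - (N - 1) = (1 : Int) by ring]
    · -- last element extends the run: append (N - start)
      have hcN : c (N - 1) = false := by simp [hc, hcond]
      simp only [if_neg hcond, List.filter_cons, List.filter_nil, hcN,
        Bool.false_eq_true, if_false, if_true, List.append_nil]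
      show adjDiffs (0 :: F) ++ [N - 1 + 1 - (0 :: F).getLastD 0] = adjDiffs ((0 :: F) ++ [N])
      rw [adjDiffs_append (0 :: F) N hne0F, show N - 1 + 1 = N by ring]

-- ===== VERDICT (by name: the statement is the Claim_ definition above) =====
theorem find_strikes_lens_spec : Claim_equal_find_strikes_lens := by
  intro visits _
  unfold Spec_find_strikes_lens
  exact main_eq visits
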